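-- pv_equiv track=rewrite | github.com/THUDM/iPrompt | engliship/megatron/text_generation_sgpu.py | getlastsentence
-- ===== SOURCE A (Python) =====
-- def getlastsentence(str):
--     signal=[',','!','?','\n','.']
--     signal2=[':']
--     fom=''
--     sig1=0
--     sig2=0
--     nowplace=0
--     while True:
--         nowplace+=1
--         if len(str)<nowplace:
--             return str
--         if str[-nowplace] in signal:
--             if nowplace>70:
--                 return str[-nowplace+1:]
--
--     return 0
-- ===== SOURCE B (Python) =====
-- def getlastsentence(str):
--     seps = ',!?\n.'
--     last = -1
--     for i in range(len(str) - 70):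
--         if str[i] in seps:
--             last = i
--     return str[last + 1:]
-- ===== Notes on version B (the rewrite author's own statement) =====
-- stated objective: simpler
-- what changed: Replaces the end-to-front while-True search with early exit by a single forward for-loop over the indices more than 70 chars from the end that records the last separator index, then one slice.
import Mathlib
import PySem

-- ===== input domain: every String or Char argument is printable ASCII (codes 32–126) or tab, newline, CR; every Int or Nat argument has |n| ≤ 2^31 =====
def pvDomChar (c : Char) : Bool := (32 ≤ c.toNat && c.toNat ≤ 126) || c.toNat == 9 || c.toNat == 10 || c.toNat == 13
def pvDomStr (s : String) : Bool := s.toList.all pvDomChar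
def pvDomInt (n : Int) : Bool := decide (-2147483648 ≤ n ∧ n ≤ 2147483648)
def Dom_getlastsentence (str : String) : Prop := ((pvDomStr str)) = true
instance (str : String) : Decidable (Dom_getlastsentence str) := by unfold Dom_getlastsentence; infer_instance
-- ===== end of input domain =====

-- B replaces A's end-to-front while-True search by a forward last-match pass and one slice (objective: simpler).

-- ===== PORT A =====
def pvSignalA : List Char := [',', '!', '?', '\n', '.']

-- A's 'while True' loop: nowplace is incremented at the top of each iteration.
def pvALoop (l : List Char) (nowplace : Nat) : List Char :=
  let np := nowplace + 1
  if l.length < np then l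
  else if PySem.List.pyGetD l (-(np : Int)) ' ' ∈ pvSignalA then
    if 70 < np then PySem.List.slice l (some (-(np : Int) + 1)) none
    else pvALoop l np
  else pvALoop l np
termination_by l.length - nowplace
decreasing_by all_goals omega

def getlastsentence (str : String) : String := String.mk (pvALoop str.toList 0)

-- ===== PORT B =====
def getlastsentence_alt (str : String) : String :=
  let l := str.toList
  let last := (PySem.List.pyRange 0 ((l.length : Int) - 70) 1).foldl
      (fun acc i => if PySem.List.pyGetD l i ' ' ∈ [',', '!', '?', '\n', '.'] then i else acc) (-1)
  String.mk (PySem.List.slice l (some (last + 1)) none)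

-- ===== PRECONDITION & SPEC =====
def Spec_getlastsentence (str : String) (out : String) : Prop := out = getlastsentence_alt str
instance (str : String) (out : String) : Decidable (Spec_getlastsentence str out) := by unfold Spec_getlastsentence; infer_instance

-- ===== CLAIM (what is proved, stated in full; the proofs are below) =====
def Claim_equal_getlastsentence : Prop := ∀ (str : String), Dom_getlastsentence str → Spec_getlastsentence str (getlastsentence str)

-- ===== LEMMAS AND PROOFS =====

-- last separator index (as Int, -1 if none) among the first m characters of l
def pvLastIdx (l : List Char) : Nat → Int
  | 0 => -1
  | m + 1 => if l.getD m ' ' ∈ pvSignalA then (m : Int) else pvLastIdx l m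

theorem pvFold_eq (l : List Char) (m : Nat) :
    (PySem.List.pyRange 0 ((m : Nat) : Int) 1).foldl
      (fun acc i => if PySem.List.pyGetD l i ' ' ∈ [',', '!', '?', '\n', '.'] then i else acc) (-1)
      = pvLastIdx l m := by
  induction m with
  | zero => rw [PySem.List.pyRange_one_eq_nil (by norm_num)]; rfl
  | succ m ih =>
    have hc : (((m + 1 : Nat)) : Int) = (m : Int) + 1 := by push_cast; ring
    rw [hc, PySem.List.pyRange_one_succ_right (by positivity), List.foldl_append, ih]
    simp only [List.foldl_cons, List.foldl_nil, PySem.List.pyGetD_natCast, pvLastIdx, pvSignalA]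
    rfl

theorem pvAlt_eq (str : String) :
    getlastsentence_alt str
      = String.mk (PySem.List.slice str.toList
          (some (pvLastIdx str.toList (str.toList.length - 70) + 1)) none) := by
  set l := str.toList with hl
  by_cases h : 70 ≤ l.length
  · have h1 : ((l.length : Int) - 70) = ((l.length - 70 : Nat) : Int) := by omega
    simp only [getlastsentence_alt, ← hl, h1, pvFold_eq]
  · have h2 : PySem.List.pyRange 0 ((l.length : Int) - 70) 1 = [] := by
      simp [PySem.List.pyRange]; omega
    have h3 : l.length - 70 = 0 := by omega
    simp only [getlastsentence_alt, ← hl, h2, h3, List.foldl_nil, pvLastIdx]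

theorem pvLastIdx_min_succ (l : List Char) (m t : Nat)
    (h : ¬(l.getD m ' ' ∈ pvSignalA ∧ m < t)) :
    pvLastIdx l (min (m + 1) t) = pvLastIdx l (min m t) := by
  by_cases hm : m < t
  · have h1 : min (m + 1) t = m + 1 := by omega
    have h2 : min m t = m := by omega
    rw [h1, h2]
    simp only [pvLastIdx]
    have hnp : ¬ (l.getD m ' ' ∈ pvSignalA) := fun hp => h ⟨hp, hm⟩
    rw [if_neg hnp]
  · have h1 : min (m + 1) t = t := by omega
    have h2 : min m t = t := by omega
    rw [h1, h2]

theorem pvA_eq (l : List Char) (m : Nat) (hm : m ≤ l.length) :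
    pvALoop l (l.length - m)
      = PySem.List.slice l (some (pvLastIdx l (min m (l.length - 70)) + 1)) none := by
  induction m with
  | zero =>
    rw [pvALoop]
    have : l.length < l.length - 0 + 1 := by omega
    simp only [this, if_true]
    simp [pvLastIdx]
  | succ m ih =>
    have hmn : m + 1 ≤ l.length := hm
    rw [pvALoop]
    have hnp : l.length - (m + 1) + 1 = l.length - m := by omega
    rw [hnp]
    have hlt : ¬ (l.length < l.length - m) := by omega
    simp only [hlt, if_false]
    have hpos : 0 < l.length - m := by omega
    have hle : l.length - m ≤ l.length := by omega
    have hidx : PySem.List.pyGetD l (-((l.length - m : Nat) : Int)) ' '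
        = l.getD m ' ' := by
      rw [PySem.List.pyGetD_neg_natCast _ _ _ hpos hle]
      have : l.length - (l.length - m) = m := by omega
      simp only [this]
      rw [List.getD_eq_getElem l ' ' (by omega)]
    rw [hidx]
    by_cases hp : l.getD m ' ' ∈ pvSignalA
    · simp only [hp, if_true]
      by_cases h70 : 70 < l.length - m
      · simp only [h70, if_true]
        have hk : (-(((l.length - m : Nat)) : Int) + 1) = -(((l.length - m - 1 : Nat)) : Int) := by
          omega
        rw [hk, PySem.List.slice_from_neg_natCast _ _ (by omega)]
        have hmin : min (m + 1) (l.length - 70) = m + 1 := by omega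
        rw [hmin]
        simp only [pvLastIdx, hp, if_true]
        rw [PySem.List.slice_from _ (by omega)]
        congr 1
        omega
      · simp only [h70, if_false]
        rw [ih (by omega)]
        rw [pvLastIdx_min_succ l m _ (by intro ⟨_, hlt'⟩; omega)]
    · simp only [hp, if_false]
      rw [ih (by omega)]
      rw [pvLastIdx_min_succ l m _ (by intro ⟨hp', _⟩; exact hp hp')]

-- ===== VERDICT (by name: the statement is the Claim_ definition above) =====
theorem getlastsentence_spec : Claim_equal_getlastsentence := by
  intro str _
  unfold Spec_getlastsentence getlastsentence
  rw [pvAlt_eq]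
  have h := pvA_eq str.toList str.toList.length (le_refl _)
  have h0 : str.toList.length - str.toList.length = 0 := by omega
  have hmin : min str.toList.length (str.toList.length - 70) = str.toList.length - 70 := by omega
  rw [h0, hmin] at h
  rw [h]
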